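-- pv_equiv track=rewrite | github.com/kafein-product-space/KAI-Fusion | backend/app/routes/export/package_generator.py | _create_optimized_requirements
-- ===== SOURCE A (Python) =====
-- from typing import Dict, Any, List, Optional
--
-- def _create_optimized_requirements(components: Dict[str, str]) -> str:
--     """Create optimized requirements.txt based on actual component usage"""
--
--     # Base requirements always needed
--     base_requirements = [
--         "fastapi>=0.104.0",
--         "uvicorn[standard]>=0.24.0",
--         "pydantic>=2.5.0",
--         "langchain-core>=0.3.0",
--         "langgraph>=0.6.0"
--     ]
--
--     # Analyze components for additional requirements
--     additional_requirements = set()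
--
--     for component_name, source_code in components.items():
--         # Check for specific imports in the source code
--         if "langchain_openai" in source_code:
--             additional_requirements.add("langchain-openai>=0.3.0")
--         if "langchain_tavily" in source_code:
--             additional_requirements.add("langchain-tavily>=0.2.0")
--         if "langchain_cohere" in source_code:
--             additional_requirements.add("langchain-cohere>=0.4.0")
--         if "langchain_community" in source_code:
--             additional_requirements.add("langchain-community>=0.3.0")
--         if "sqlalchemy" in source_code:
--             additional_requirements.add("sqlalchemy>=2.0.0")
--             additional_requirements.add("asyncpg>=0.28.0")
--         if "requests" in source_code:
--             additional_requirements.add("requests>=2.32.0")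
--         if "httpx" in source_code:
--             additional_requirements.add("httpx>=0.28.0")
--         if "aiofiles" in source_code:
--             additional_requirements.add("aiofiles>=23.0.0")
--
--     # Combine and sort
--     all_requirements = sorted(base_requirements + list(additional_requirements))
--
--     return "\n".join(all_requirements)
-- ===== SOURCE B (Python) =====
-- def _create_optimized_requirements(components):
--     """Create optimized requirements.txt based on actual component usage"""
--
--     base_requirements = [
--         "fastapi>=0.104.0",
--         "uvicorn[standard]>=0.24.0",
--         "pydantic>=2.5.0",
--         "langchain-core>=0.3.0",
--         "langgraph>=0.6.0",
--     ]
--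
--     # rule table: substring token -> packages it implies
--     rules = [
--         ("langchain_openai", ["langchain-openai>=0.3.0"]),
--         ("langchain_tavily", ["langchain-tavily>=0.2.0"]),
--         ("langchain_cohere", ["langchain-cohere>=0.4.0"]),
--         ("langchain_community", ["langchain-community>=0.3.0"]),
--         ("sqlalchemy", ["sqlalchemy>=2.0.0", "asyncpg>=0.28.0"]),
--         ("requests", ["requests>=2.32.0"]),
--         ("httpx", ["httpx>=0.28.0"]),
--         ("aiofiles", ["aiofiles>=23.0.0"]),
--     ]
--
--     extra = [pkg
--              for token, packages in rules
--              if any(token in source for source in components.values())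
--              for pkg in packages]
--
--     return "\n".join(sorted(base_requirements + extra))
-- ===== Notes on version B (the rewrite author's own statement) =====
-- stated objective: alternative
-- what changed: Replaces A's per-component cascade of eight hard-coded substring ifs accumulating into a set with a data-driven rule table (token -> implied packages) iterated once, each rule fired by a single any()-scan over the component sources, collecting packages into a duplicate-free list comprehension instead of a set.
import Mathlib
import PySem

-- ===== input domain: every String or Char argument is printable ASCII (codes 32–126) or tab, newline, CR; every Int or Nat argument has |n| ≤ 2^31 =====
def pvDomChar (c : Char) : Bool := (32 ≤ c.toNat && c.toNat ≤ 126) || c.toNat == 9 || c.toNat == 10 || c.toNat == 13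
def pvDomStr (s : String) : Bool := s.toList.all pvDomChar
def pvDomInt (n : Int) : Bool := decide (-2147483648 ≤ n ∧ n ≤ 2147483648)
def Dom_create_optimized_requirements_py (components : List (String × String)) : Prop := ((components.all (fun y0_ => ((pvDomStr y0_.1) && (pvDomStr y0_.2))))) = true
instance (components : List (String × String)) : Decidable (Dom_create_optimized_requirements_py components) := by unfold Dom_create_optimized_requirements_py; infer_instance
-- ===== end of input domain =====

-- B replaces A's per-component cascade of membership ifs by a rule table (token → implied packages)
-- scanned once with an any-over-components test per rule (objective: alternative decomposition, same cost).


-- ===== PORT A =====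
def pvBase : List String :=
  ["fastapi>=0.104.0", "uvicorn[standard]>=0.24.0", "pydantic>=2.5.0",
   "langchain-core>=0.3.0", "langgraph>=0.6.0"]

-- A's loop body: the cascade of 'if <token> in source_code: additional.add(...)'
def pvAddStep (s : PySem.Set String) (src : String) : PySem.Set String :=
  let s := if PySem.Str.isIn "langchain_openai" src then PySem.Set.add s "langchain-openai>=0.3.0" else s
  let s := if PySem.Str.isIn "langchain_tavily" src then PySem.Set.add s "langchain-tavily>=0.2.0" else s
  let s := if PySem.Str.isIn "langchain_cohere" src then PySem.Set.add s "langchain-cohere>=0.4.0" else s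
  let s := if PySem.Str.isIn "langchain_community" src then PySem.Set.add s "langchain-community>=0.3.0" else s
  let s := if PySem.Str.isIn "sqlalchemy" src then PySem.Set.add (PySem.Set.add s "sqlalchemy>=2.0.0") "asyncpg>=0.28.0" else s
  let s := if PySem.Str.isIn "requests" src then PySem.Set.add s "requests>=2.32.0" else s
  let s := if PySem.Str.isIn "httpx" src then PySem.Set.add s "httpx>=0.28.0" else s
  let s := if PySem.Str.isIn "aiofiles" src then PySem.Set.add s "aiofiles>=23.0.0" else s
  s

def create_optimized_requirements_py (components : List (String × String)) : String :=
  let additional : PySem.Set String :=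
    components.foldl (fun s kv => pvAddStep s kv.2) PySem.Set.empty
  let all_requirements := PySem.List.sorted (pvBase ++ additional) (fun x => x) false
  PySem.Str.join "\n" all_requirements

-- ===== PORT B =====
def pvRules : List (String × List String) :=
  [("langchain_openai", ["langchain-openai>=0.3.0"]),
   ("langchain_tavily", ["langchain-tavily>=0.2.0"]),
   ("langchain_cohere", ["langchain-cohere>=0.4.0"]),
   ("langchain_community", ["langchain-community>=0.3.0"]),
   ("sqlalchemy", ["sqlalchemy>=2.0.0", "asyncpg>=0.28.0"]),
   ("requests", ["requests>=2.32.0"]),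
   ("httpx", ["httpx>=0.28.0"]),
   ("aiofiles", ["aiofiles>=23.0.0"])]

def create_optimized_requirements_py_alt (components : List (String × String)) : String :=
  let extra : List String :=
    pvRules.foldl
      (fun acc r =>
        if components.any (fun kv => PySem.Str.isIn r.1 kv.2) then acc ++ r.2 else acc) []
  PySem.Str.join "\n" (PySem.List.sorted (pvBase ++ extra) (fun x => x) false)

-- ===== PRECONDITION & SPEC =====
def Spec_create_optimized_requirements_py (components : List (String × String)) (out : String) : Prop := out = create_optimized_requirements_py_alt components
instance (components : List (String × String)) (out : String) : Decidable (Spec_create_optimized_requirements_py components out) := by unfold Spec_create_optimized_requirements_py; infer_instance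

-- ===== CLAIM (what is proved, stated in full; the proofs are below) =====
def Claim_equal_create_optimized_requirements_py : Prop := ∀ (components : List (String × String)), Dom_create_optimized_requirements_py components → Spec_create_optimized_requirements_py components (create_optimized_requirements_py components)

-- ===== LEMMAS AND PROOFS =====

-- membership through one 'if token fires then add' step
theorem pv_mem_iteAdd (c : Bool) (s : List String) (p x : String) :
    (x ∈ (if c then PySem.Set.add s p else s)) ↔ x ∈ s ∨ (c = true ∧ x = p) := by
  cases c <;> simp [PySem.Set.mem_add]

theorem pv_mem_iteAdd2 (c : Bool) (s : List String) (p q x : String) :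
    (x ∈ (if c then PySem.Set.add (PySem.Set.add s p) q else s)) ↔
      x ∈ s ∨ (c = true ∧ (x = p ∨ x = q)) := by
  cases c <;> simp [PySem.Set.mem_add]
  tauto

theorem pv_nodup_iteAdd (c : Bool) {s : List String} {p : String} (h : s.Nodup) :
    (if c then PySem.Set.add s p else s).Nodup := by
  cases c <;> simp [h, PySem.Set.nodup_add]

theorem pv_nodup_iteAdd2 (c : Bool) {s : List String} {p q : String} (h : s.Nodup) :
    (if c then PySem.Set.add (PySem.Set.add s p) q else s).Nodup := by
  cases c <;> simp [h, PySem.Set.nodup_add]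

theorem pv_mem_addStep (s : List String) (src x : String) :
    x ∈ pvAddStep s src ↔ x ∈ s ∨ ∃ r ∈ pvRules, PySem.Str.isIn r.1 src = true ∧ x ∈ r.2 := by
  simp only [pvAddStep, pv_mem_iteAdd, pv_mem_iteAdd2, pvRules, List.mem_cons,
    List.not_mem_nil, or_false]
  aesop

theorem pv_nodup_addStep {s : List String} (src : String) (h : s.Nodup) :
    (pvAddStep s src).Nodup := by
  unfold pvAddStep
  exact pv_nodup_iteAdd _ (pv_nodup_iteAdd _ (pv_nodup_iteAdd _ (pv_nodup_iteAdd2 _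
    (pv_nodup_iteAdd _ (pv_nodup_iteAdd _ (pv_nodup_iteAdd _ (pv_nodup_iteAdd _ h)))))))

theorem pv_mem_afold (comps : List (String × String)) (s : List String) (x : String) :
    x ∈ comps.foldl (fun s kv => pvAddStep s kv.2) s ↔
      x ∈ s ∨ ∃ kv ∈ comps, ∃ r ∈ pvRules, PySem.Str.isIn r.1 kv.2 = true ∧ x ∈ r.2 := by
  induction comps generalizing s with
  | nil => simp
  | cons kv t ih =>
    simp only [List.foldl_cons, ih, pv_mem_addStep, List.mem_cons]
    constructor
    · rintro ((h | h) | h)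
      · exact Or.inl h
      · exact Or.inr ⟨kv, Or.inl rfl, h⟩
      · obtain ⟨kv', h1, h2⟩ := h; exact Or.inr ⟨kv', Or.inr h1, h2⟩
    · rintro (h | ⟨kv', (rfl | h1), h2⟩)
      · exact Or.inl (Or.inl h)
      · exact Or.inl (Or.inr h2)
      · exact Or.inr ⟨kv', h1, h2⟩

theorem pv_nodup_afold (comps : List (String × String)) (s : List String) (h : s.Nodup) :
    (comps.foldl (fun s kv => pvAddStep s kv.2) s).Nodup := by
  induction comps generalizing s with
  | nil => exact h
  | cons kv t ih => exact ih _ (pv_nodup_addStep kv.2 h)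

-- B's rule-table fold: membership
theorem pv_mem_rulefold (rs : List (String × List String)) (P : String → Bool)
    (acc : List String) (x : String) :
    x ∈ rs.foldl (fun acc r => if P r.1 then acc ++ r.2 else acc) acc ↔
      x ∈ acc ∨ ∃ r ∈ rs, P r.1 = true ∧ x ∈ r.2 := by
  induction rs generalizing acc with
  | nil => simp
  | cons r t ih =>
    simp only [List.foldl_cons, ih]
    by_cases h : P r.1 = true <;> simp [h] <;> tauto

-- B's rule-table fold over pvRules is Nodup (packages across the concrete rules are distinct strings)
theorem pv_nodup_rulefold (P : String → Bool) :
    (pvRules.foldl (fun acc r => if P r.1 then acc ++ r.2 else acc) []).Nodup := by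
  simp only [pvRules, List.foldl_cons, List.foldl_nil]
  by_cases h1 : P "langchain_openai" <;>
  by_cases h2 : P "langchain_tavily" <;>
  by_cases h3 : P "langchain_cohere" <;>
  by_cases h4 : P "langchain_community" <;>
  by_cases h5 : P "sqlalchemy" <;>
  by_cases h6 : P "requests" <;>
  by_cases h7 : P "httpx" <;>
  by_cases h8 : P "aiofiles" <;>
  simp [h1, h2, h3, h4, h5, h6, h7, h8]

theorem pv_additional_perm (comps : List (String × String)) :
    (comps.foldl (fun s kv => pvAddStep s kv.2) PySem.Set.empty).Perm
      (pvRules.foldl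
        (fun acc r => if comps.any (fun kv => PySem.Str.isIn r.1 kv.2) then acc ++ r.2 else acc) []) := by
  refine (List.perm_ext_iff_of_nodup
      (pv_nodup_afold comps PySem.Set.empty List.nodup_nil)
      (pv_nodup_rulefold (fun tok => comps.any (fun kv => PySem.Str.isIn tok kv.2)))).mpr ?_
  intro x
  rw [pv_mem_afold, pv_mem_rulefold _ (fun tok => comps.any (fun kv => PySem.Str.isIn tok kv.2))]
  simp only [PySem.Set.empty, List.not_mem_nil, false_or, List.any_eq_true]
  constructor
  · rintro ⟨kv, hkv, r, hr, hc, hx⟩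
    exact ⟨r, hr, ⟨kv, hkv, hc⟩, hx⟩
  · rintro ⟨r, hr, ⟨kv, hkv, hc⟩, hx⟩
    exact ⟨kv, hkv, r, hr, hc, hx⟩

-- ===== VERDICT (by name: the statement is the Claim_ definition above) =====
theorem create_optimized_requirements_py_spec : Claim_equal_create_optimized_requirements_py := by
  intro comps _
  unfold Spec_create_optimized_requirements_py
  unfold create_optimized_requirements_py create_optimized_requirements_py_alt
  have h := PySem.List.sorted_eq_sorted_of_perm
    (pvBase ++ comps.foldl (fun s kv => pvAddStep s kv.2) PySem.Set.empty)
    (pvBase ++ pvRules.foldl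
      (fun acc r => if comps.any (fun kv => PySem.Str.isIn r.1 kv.2) then acc ++ r.2 else acc) [])
    (fun x => x) (fun _ _ h => h)
    ((pv_additional_perm comps).append_left pvBase)
  simp only [h]
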